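-- pv_equiv track=rewrite | github.com/JoaoCarlos1342/LECI | 1º ano/1º Semestre/FP/Exercícios Resolvidos/progT.py | farthest_first_last
-- ===== SOURCE A (Python) =====
-- def farthest_first_last(lst):
--     first_seen = {}
--     max_dist = -1
--     best_start_idx = -1
--     result = None
--
--     for i, num in enumerate(lst):
--         if num not in first_seen:
--             first_seen[num] = i
--         start_idx = first_seen[num]
--         dist = i - start_idx
--
--         if dist > max_dist:
--             max_dist = dist
--             best_start_idx = start_idx
--             result = (num, i)
--
--         elif dist == max_dist:
--             if start_idx < best_start_idx:
--                 best_start_idx = start_idx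
--                 result = (num, i)
--
--     return result
-- ===== SOURCE B (Python) =====
-- def farthest_first_last(lst):
--     first = {}
--     last = {}
--     for i, v in enumerate(lst):
--         if v not in first:
--             first[v] = i
--         last[v] = i
--     best = None  # (value, span)
--     for v, f in first.items():
--         span = last[v] - f
--         if best is None or span > best[1]:
--             best = (v, span)
--     if best is None:
--         return None
--     return (best[0], last[best[0]])
-- ===== Notes on version B (the rewrite author's own statement) =====
-- stated objective: alternative
-- what changed: A interleaves best-candidate tracking (max distance, tie-broken by smallest start index) with the scan; B first builds first/last-occurrence index tables in one pass, then reduces over the distinct values in first-occurrence order picking the first value with strictly maximal span, which makes the tie-break logic disappear.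
import Mathlib
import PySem

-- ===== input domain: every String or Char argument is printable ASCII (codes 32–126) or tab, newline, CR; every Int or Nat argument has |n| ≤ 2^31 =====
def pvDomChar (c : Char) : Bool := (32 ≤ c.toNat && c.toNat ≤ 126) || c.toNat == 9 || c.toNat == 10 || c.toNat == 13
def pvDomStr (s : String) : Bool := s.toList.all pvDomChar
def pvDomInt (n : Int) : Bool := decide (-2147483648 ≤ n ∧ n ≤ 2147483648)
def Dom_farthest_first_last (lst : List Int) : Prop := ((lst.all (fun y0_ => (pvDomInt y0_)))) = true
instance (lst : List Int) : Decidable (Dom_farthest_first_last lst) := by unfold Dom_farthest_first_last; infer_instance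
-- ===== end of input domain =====

-- B replaces A's single interleaved best-tracking scan by two occurrence-index tables plus a
-- separate reduction over the distinct values (objective: alternative decomposition, same cost).

-- ===== PORT A =====
-- loop body of A's scan; state = (first_seen, max_dist, best_start_idx, result)
def pvAStep (st : PySem.Dict Int Int × Int × Int × Option (Int × Int)) (p : Int × Int) :
    PySem.Dict Int Int × Int × Int × Option (Int × Int) :=
  let fs := if st.1.contains p.2 then st.1 else st.1.insert p.2 p.1
  let start := fs.getD p.2 0  -- first_seen[num]: the key was just ensured present, so getD is exact
  let dist := p.1 - start
  if dist > st.2.1 then (fs, dist, start, some (p.2, p.1))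
  else if dist = st.2.1 then
    if start < st.2.2.1 then (fs, st.2.1, start, some (p.2, p.1))
    else (fs, st.2.1, st.2.2.1, st.2.2.2)
  else (fs, st.2.1, st.2.2.1, st.2.2.2)

def farthest_first_last (lst : List Int) : Option (Int × Int) :=
  ((PySem.List.enumerate lst 0).foldl pvAStep (PySem.Dict.empty, -1, -1, none)).2.2.2

-- ===== PORT B =====
-- loop body of B's first pass; state = (first, last)
def pvBDictStep (st : PySem.Dict Int Int × PySem.Dict Int Int) (p : Int × Int) :
    PySem.Dict Int Int × PySem.Dict Int Int :=
  ((if st.1.contains p.2 then st.1 else st.1.insert p.2 p.1), st.2.insert p.2 p.1)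

-- loop body of B's reduction over first.items(); accumulator = best = None | (value, span)
def pvBBest (lastD : PySem.Dict Int Int) (b : Option (Int × Int)) (q : Int × Int) :
    Option (Int × Int) :=
  let span := lastD.getD q.1 0 - q.2  -- last[v]: every key of first is a key of last, so getD is exact
  match b with
  | none => some (q.1, span)
  | some bb => if span > bb.2 then some (q.1, span) else b

def farthest_first_last_alt (lst : List Int) : Option (Int × Int) :=
  let fl := (PySem.List.enumerate lst 0).foldl pvBDictStep (PySem.Dict.empty, PySem.Dict.empty)
  match fl.1.items.foldl (pvBBest fl.2) none with
  | none => none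
  | some bb => some (bb.1, fl.2.getD bb.1 0)

-- ===== PRECONDITION & SPEC =====
def Spec_farthest_first_last (lst : List Int) (out : Option (Int × Int)) : Prop := out = farthest_first_last_alt lst
instance (lst : List Int) (out : Option (Int × Int)) : Decidable (Spec_farthest_first_last lst out) := by unfold Spec_farthest_first_last; infer_instance

-- ===== CLAIM (what is proved, stated in full; the proofs are below) =====
def Claim_equal_farthest_first_last : Prop := ∀ (lst : List Int), Dom_farthest_first_last lst → Spec_farthest_first_last lst (farthest_first_last lst)

-- ===== LEMMAS AND PROOFS =====

-- the two tables built by B's first pass, and the first/last index and span of a value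
def pvFL (l : List Int) : PySem.Dict Int Int × PySem.Dict Int Int :=
  (PySem.List.enumerate l 0).foldl pvBDictStep (PySem.Dict.empty, PySem.Dict.empty)
def pvFD (l : List Int) : PySem.Dict Int Int := (pvFL l).1
def pvLD (l : List Int) : PySem.Dict Int Int := (pvFL l).2
def pvF (l : List Int) (v : Int) : Int := (pvFD l).getD v 0
def pvL (l : List Int) (v : Int) : Int := (pvLD l).getD v 0
def pvSp (l : List Int) (v : Int) : Int := pvL l v - pvF l v
-- A's full scan state
def pvStA (l : List Int) : PySem.Dict Int Int × Int × Int × Option (Int × Int) :=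
  (PySem.List.enumerate l 0).foldl pvAStep (PySem.Dict.empty, -1, -1, none)

lemma pvStA_snoc (l : List Int) (x : Int) :
    pvStA (l ++ [x]) = pvAStep (pvStA l) ((l.length : Int), x) := by
  unfold pvStA
  rw [PySem.List.enumerate_append, List.foldl_append]
  simp [PySem.List.enumerate_cons, PySem.List.enumerate_nil]

lemma pvFL_snoc (l : List Int) (x : Int) :
    pvFL (l ++ [x]) = pvBDictStep (pvFL l) ((l.length : Int), x) := by
  unfold pvFL
  rw [PySem.List.enumerate_append, List.foldl_append]
  simp [PySem.List.enumerate_cons, PySem.List.enumerate_nil]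

-- combined facts about the two tables
lemma pvGood (l : List Int) :
    (∀ v : Int, (pvFD l).contains v = true ↔ v ∈ l) ∧
    (pvFD l).keys.Nodup ∧
    (pvFD l).items.Pairwise (fun a b => a.2 < b.2) ∧
    (∀ q ∈ (pvFD l).items, 0 ≤ q.2 ∧ q.2 ≤ pvL l q.1 ∧ pvL l q.1 < (l.length : Int)) ∧
    (∀ v ∈ l, (v, pvF l v) ∈ (pvFD l).items) := by
  induction l using List.reverseRecOn with
  | nil =>
      refine ⟨?_, ?_, ?_, ?_, ?_⟩ <;>
        simp [pvFD, pvFL, PySem.List.enumerate_nil, PySem.Dict.empty]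
  | append_singleton l x ih =>
      obtain ⟨g1, g2, g3, g4, g5⟩ := ih
      have hFL := pvFL_snoc l x
      have hlen : ((l ++ [x]).length : Int) = (l.length : Int) + 1 := by
        simp
      have hLD : pvLD (l ++ [x]) = (pvLD l).insert x (l.length : Int) := by
        simp [pvLD, hFL, pvBDictStep]
      by_cases hx : x ∈ l
      · have hc : (pvFD l).contains x = true := (g1 x).mpr hx
        have hc2 : (pvFL l).1.contains x = true := hc
        have hFD : pvFD (l ++ [x]) = pvFD l := by
          simp [pvFD, hFL, pvBDictStep, hc2]
        have hLne : ∀ v : Int, v ≠ x → pvL (l ++ [x]) v = pvL l v := by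
          intro v hv
          simp [pvL, hLD, PySem.Dict.getD_insert_of_ne _ _ _ hv]
        refine ⟨?_, ?_, ?_, ?_, ?_⟩
        · intro v
          rw [hFD, g1]
          simp only [List.mem_append, List.mem_singleton]
          constructor
          · exact Or.inl
          · rintro (h | h)
            · exact h
            · subst h
              exact hx
        · rw [hFD]; exact g2
        · rw [hFD]; exact g3
        · intro q hq
          rw [hFD] at hq
          obtain ⟨h0, h1, h2⟩ := g4 q hq
          by_cases hqx : q.1 = x
          · have hL : pvL (l ++ [x]) q.1 = (l.length : Int) := by
              simp [pvL, hLD, hqx, PySem.Dict.getD_insert_self]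
            refine ⟨h0, ?_, ?_⟩
            · rw [hL]; omega
            · rw [hL, hlen]; omega
          · rw [hLne q.1 hqx, hlen]
            exact ⟨h0, h1, by omega⟩
        · intro v hv
          have hv' : v ∈ l := by
            rcases List.mem_append.mp hv with h | h
            · exact h
            · simp only [List.mem_singleton] at h
              subst h
              exact hx
          have : pvF (l ++ [x]) v = pvF l v := by simp [pvF, hFD]
          rw [this, hFD]
          exact g5 v hv'
      · have hc : (pvFD l).contains x = false := by
          cases h : (pvFD l).contains x with
          | false => rfl
          | true => exact absurd ((g1 x).mp h) hx
        have hc2 : (pvFL l).1.contains x = false := hc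
        have hFD : pvFD (l ++ [x]) = (pvFD l).insert x (l.length : Int) := by
          simp [pvFD, hFL, pvBDictStep, hc2]
        have hitems : (pvFD (l ++ [x])).items = (pvFD l).items ++ [(x, (l.length : Int))] := by
          rw [hFD, PySem.Dict.items_insert_of_not_contains _ _ hc]
        have hkeyl : ∀ q ∈ (pvFD l).items, q.1 ∈ l := by
          intro q hq
          exact (g1 q.1).mp ((PySem.Dict.contains_iff_mem_keys _ _).mpr
            (PySem.Dict.mem_keys_of_mem_items _ hq))
        have hLne : ∀ v : Int, v ≠ x → pvL (l ++ [x]) v = pvL l v := by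
          intro v hv
          simp [pvL, hLD, PySem.Dict.getD_insert_of_ne _ _ _ hv]
        have hLx : pvL (l ++ [x]) x = (l.length : Int) := by
          simp [pvL, hLD, PySem.Dict.getD_insert_self]
        refine ⟨?_, ?_, ?_, ?_, ?_⟩
        · intro v
          rw [hFD, Bool.eq_iff_iff.mpr (iff_of_eq (congrArg (· = true)
            (PySem.Dict.contains_insert (pvFD l) x v (l.length : Int))))]
          simp only [Bool.or_eq_true, beq_iff_eq, List.mem_append, List.mem_singleton, g1]
          tauto
        · rw [hFD]
          exact PySem.Dict.nodup_keys_insert _ x _ g2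
        · rw [hitems]
          refine List.pairwise_append.mpr ⟨g3, by simp, ?_⟩
          intro a ha b hb
          obtain ⟨_, h1, h2⟩ := g4 a ha
          simp only [List.mem_singleton] at hb
          subst hb
          omega
        · intro q hq
          rw [hitems] at hq
          rcases List.mem_append.mp hq with h | h
          · have hqx : q.1 ≠ x := fun e => hx (e ▸ hkeyl q h)
            obtain ⟨h0, h1, h2⟩ := g4 q h
            rw [hLne q.1 hqx, hlen]
            exact ⟨h0, h1, by omega⟩
          · simp only [List.mem_singleton] at h
            subst h
            rw [hLx, hlen]
            refine ⟨by positivity, le_refl _, by omega⟩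
        · intro v hv
          rcases List.mem_append.mp hv with h | h
          · have hvx : v ≠ x := fun e => hx (e ▸ h)
            have : pvF (l ++ [x]) v = pvF l v := by
              simp [pvF, hFD, PySem.Dict.getD_insert_of_ne _ _ _ hvx]
            rw [this, hitems]
            exact List.mem_append_left _ (g5 v h)
          · simp only [List.mem_singleton] at h
            have hFx : pvF (l ++ [x]) x = (l.length : Int) := by
              simp [pvF, hFD, PySem.Dict.getD_insert_self]
            rw [h, hFx, hitems]
            simp

-- A's loop invariant, at the end of the scan
lemma pvAInv (l : List Int) :
    (pvStA l).1 = pvFD l ∧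
    ((l = [] ∧ (pvStA l).2 = (-1, -1, none)) ∨
      ∃ w, w ∈ l ∧
        (pvStA l).2 = (pvSp l w, pvF l w, some (w, pvL l w)) ∧
        (∀ v ∈ l, pvSp l v ≤ pvSp l w) ∧
        (∀ v ∈ l, pvSp l v = pvSp l w → pvF l w ≤ pvF l v)) := by
  induction l using List.reverseRecOn with
  | nil =>
      exact ⟨rfl, Or.inl ⟨rfl, rfl⟩⟩
  | append_singleton l x ih =>
      obtain ⟨hA1, hA2⟩ := ih
      obtain ⟨g1, g2, g3, g4, g5⟩ := pvGood l
      have hsn := pvStA_snoc l x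
      have hFL := pvFL_snoc l x
      have hLD : pvLD (l ++ [x]) = (pvLD l).insert x (l.length : Int) := by
        simp [pvLD, hFL, pvBDictStep]
      have hbnd : ∀ v ∈ l, 0 ≤ pvF l v ∧ pvF l v ≤ pvL l v ∧ pvL l v < (l.length : Int) := by
        intro v hv
        simpa using g4 (v, pvF l v) (g5 v hv)
      have hLx : pvL (l ++ [x]) x = (l.length : Int) := by
        simp [pvL, hLD, PySem.Dict.getD_insert_self]
      have hLne : ∀ v : Int, v ≠ x → pvL (l ++ [x]) v = pvL l v := by
        intro v hv
        simp [pvL, hLD, PySem.Dict.getD_insert_of_ne _ _ _ hv]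
      by_cases hx : x ∈ l
      · -- x already seen: first table unchanged
        have hc : (pvFD l).contains x = true := (g1 x).mpr hx
        have hc2 : (pvFL l).1.contains x = true := hc
        have hFD : pvFD (l ++ [x]) = pvFD l := by
          simp [pvFD, hFL, pvBDictStep, hc2]
        have hF' : ∀ v : Int, pvF (l ++ [x]) v = pvF l v := by
          intro v; simp [pvF, hFD]
        have hlne : l ≠ [] := List.ne_nil_of_mem hx
        rcases hA2 with ⟨hnil, _⟩ | ⟨w, hwl, hst2, hmax, htie⟩
        · exact absurd hnil hlne
        · have hst : pvStA l = (pvFD l, pvSp l w, pvF l w, some (w, pvL l w)) := by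
            rw [← hA1, ← hst2]
          have hxb := hbnd x hx
          have hwb := hbnd w hwl
          have hdx : pvSp l x < (l.length : Int) - pvF l x := by
            unfold pvSp; omega
          have hgetx : (pvFD l).getD x 0 = pvF l x := rfl
          by_cases hgt : (l.length : Int) - pvF l x > pvSp l w
          · have hres : pvStA (l ++ [x]) =
                (pvFD l, (l.length : Int) - pvF l x, pvF l x, some (x, (l.length : Int))) := by
              rw [hsn, hst]
              simp [pvAStep, hc, hgetx, hgt]
            refine ⟨by rw [hres, hFD], Or.inr ⟨x, by simp, ?_, ?_, ?_⟩⟩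
            · rw [hres]
              have : pvSp (l ++ [x]) x = (l.length : Int) - pvF l x := by
                unfold pvSp; rw [hLx, hF']
              rw [this, hF', hLx]
            · intro v hv
              by_cases hvx : v = x
              · subst hvx; exact le_refl _
              · have hvl : v ∈ l := by
                  rcases List.mem_append.mp hv with h | h
                  · exact h
                  · simp only [List.mem_singleton] at h; exact absurd h hvx
                have : pvSp (l ++ [x]) v = pvSp l v := by
                  unfold pvSp; rw [hLne v hvx, hF']
                have h2 : pvSp (l ++ [x]) x = (l.length : Int) - pvF l x := by
                  unfold pvSp; rw [hLx, hF']
                rw [this, h2]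
                have := hmax v hvl
                omega
            · intro v hv hsp
              by_cases hvx : v = x
              · subst hvx; exact le_refl _
              · have hvl : v ∈ l := by
                  rcases List.mem_append.mp hv with h | h
                  · exact h
                  · simp only [List.mem_singleton] at h; exact absurd h hvx
                have hv1 : pvSp (l ++ [x]) v = pvSp l v := by
                  unfold pvSp; rw [hLne v hvx, hF']
                have hv2 : pvSp (l ++ [x]) x = (l.length : Int) - pvF l x := by
                  unfold pvSp; rw [hLx, hF']
                rw [hv1, hv2] at hsp
                have := hmax v hvl
                omega
          · -- dist ≤ max_dist
            have hwx : w ≠ x := by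
              intro e
              subst e
              omega
            have hspw : pvSp (l ++ [x]) w = pvSp l w := by
              unfold pvSp; rw [hLne w hwx, hF']
            by_cases heq : (l.length : Int) - pvF l x = pvSp l w
            · by_cases hlt : pvF l x < pvF l w
              · have hres : pvStA (l ++ [x]) =
                    (pvFD l, pvSp l w, pvF l x, some (x, (l.length : Int))) := by
                  rw [hsn, hst]
                  simp [pvAStep, hc, hgetx, heq, hlt]
                refine ⟨by rw [hres, hFD], Or.inr ⟨x, by simp, ?_, ?_, ?_⟩⟩
                · rw [hres]
                  have : pvSp (l ++ [x]) x = (l.length : Int) - pvF l x := by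
                    unfold pvSp; rw [hLx, hF']
                  rw [this, heq, hF', hLx]
                · intro v hv
                  by_cases hvx : v = x
                  · subst hvx
                    have : pvSp (l ++ [v]) v = (l.length : Int) - pvF l v := by
                      unfold pvSp; rw [hLx, hF']
                    omega
                  · have hvl : v ∈ l := by
                      rcases List.mem_append.mp hv with h | h
                      · exact h
                      · simp only [List.mem_singleton] at h; exact absurd h hvx
                    have h1 : pvSp (l ++ [x]) v = pvSp l v := by
                      unfold pvSp; rw [hLne v hvx, hF']
                    have h2 : pvSp (l ++ [x]) x = (l.length : Int) - pvF l x := by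
                      unfold pvSp; rw [hLx, hF']
                    have := hmax v hvl
                    omega
                · intro v hv hsp
                  simp only [hF']
                  by_cases hvx : v = x
                  · subst hvx; exact le_refl _
                  · have hvl : v ∈ l := by
                      rcases List.mem_append.mp hv with h | h
                      · exact h
                      · simp only [List.mem_singleton] at h; exact absurd h hvx
                    have h1 : pvSp (l ++ [x]) v = pvSp l v := by
                      unfold pvSp; rw [hLne v hvx, hF']
                    have h2 : pvSp (l ++ [x]) x = (l.length : Int) - pvF l x := by
                      unfold pvSp; rw [hLx, hF']
                    rw [h1, h2] at hsp
                    have := htie v hvl (by omega)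
                    omega
              · have hres : pvStA (l ++ [x]) =
                    (pvFD l, pvSp l w, pvF l w, some (w, pvL l w)) := by
                  rw [hsn, hst]
                  simp [pvAStep, hc, hgetx, heq, hlt]
                refine ⟨by rw [hres, hFD],
                  Or.inr ⟨w, List.mem_append_left _ hwl, ?_, ?_, ?_⟩⟩
                · rw [hres, hspw, hF', hLne w hwx]
                · intro v hv
                  rw [hspw]
                  by_cases hvx : v = x
                  · subst hvx
                    have : pvSp (l ++ [v]) v = (l.length : Int) - pvF l v := by
                      unfold pvSp; rw [hLx, hF']
                    omega
                  · have hvl : v ∈ l := by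
                      rcases List.mem_append.mp hv with h | h
                      · exact h
                      · simp only [List.mem_singleton] at h; exact absurd h hvx
                    have h1 : pvSp (l ++ [x]) v = pvSp l v := by
                      unfold pvSp; rw [hLne v hvx, hF']
                    have := hmax v hvl
                    omega
                · intro v hv hsp
                  simp only [hF']
                  rw [hspw] at hsp
                  by_cases hvx : v = x
                  · subst hvx
                    omega
                  · have hvl : v ∈ l := by
                      rcases List.mem_append.mp hv with h | h
                      · exact h
                      · simp only [List.mem_singleton] at h; exact absurd h hvx
                    have h1 : pvSp (l ++ [x]) v = pvSp l v := by
                      unfold pvSp; rw [hLne v hvx, hF']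
                    rw [h1] at hsp
                    exact htie v hvl hsp
            · -- dist < max_dist: nothing changes
              have hres : pvStA (l ++ [x]) =
                  (pvFD l, pvSp l w, pvF l w, some (w, pvL l w)) := by
                rw [hsn, hst]
                simp [pvAStep, hc, hgetx, hgt, heq]
              refine ⟨by rw [hres, hFD],
                Or.inr ⟨w, List.mem_append_left _ hwl, ?_, ?_, ?_⟩⟩
              · rw [hres, hspw, hF', hLne w hwx]
              · intro v hv
                rw [hspw]
                by_cases hvx : v = x
                · subst hvx
                  have : pvSp (l ++ [v]) v = (l.length : Int) - pvF l v := by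
                    unfold pvSp; rw [hLx, hF']
                  omega
                · have hvl : v ∈ l := by
                    rcases List.mem_append.mp hv with h | h
                    · exact h
                    · simp only [List.mem_singleton] at h; exact absurd h hvx
                  have h1 : pvSp (l ++ [x]) v = pvSp l v := by
                    unfold pvSp; rw [hLne v hvx, hF']
                  have := hmax v hvl
                  omega
              · intro v hv hsp
                simp only [hF']
                rw [hspw] at hsp
                by_cases hvx : v = x
                · subst hvx
                  have : pvSp (l ++ [v]) v = (l.length : Int) - pvF l v := by
                    unfold pvSp; rw [hLx, hF']
                  omega
                · have hvl : v ∈ l := by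
                    rcases List.mem_append.mp hv with h | h
                    · exact h
                    · simp only [List.mem_singleton] at h; exact absurd h hvx
                  have h1 : pvSp (l ++ [x]) v = pvSp l v := by
                    unfold pvSp; rw [hLne v hvx, hF']
                  rw [h1] at hsp
                  exact htie v hvl hsp
      · -- x is new: first table gains (x, len l), dist = 0
        have hc : (pvFD l).contains x = false := by
          cases h : (pvFD l).contains x with
          | false => rfl
          | true => exact absurd ((g1 x).mp h) hx
        have hc2 : (pvFL l).1.contains x = false := hc
        have hFD : pvFD (l ++ [x]) = (pvFD l).insert x (l.length : Int) := by
          simp [pvFD, hFL, pvBDictStep, hc2]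
        have hFx : pvF (l ++ [x]) x = (l.length : Int) := by
          simp [pvF, hFD, PySem.Dict.getD_insert_self]
        have hFne : ∀ v : Int, v ≠ x → pvF (l ++ [x]) v = pvF l v := by
          intro v hv
          simp [pvF, hFD, PySem.Dict.getD_insert_of_ne _ _ _ hv]
        rcases hA2 with ⟨hnil, hst2⟩ | ⟨w, hwl, hst2, hmax, htie⟩
        · subst hnil
          have hst : pvStA ([] : List Int) = (pvFD [], -1, -1, none) := by
            rw [← hA1, ← hst2]
          have hres : pvStA (([] : List Int) ++ [x]) = (pvFD ([] : List Int) |>.insert x 0, 0, 0, some (x, 0)) := by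
            rw [hsn, hst]
            simp [pvAStep, hc, PySem.Dict.getD_insert_self]
          refine ⟨by rw [hres, hFD]; rfl, Or.inr ⟨x, by simp, ?_, ?_, ?_⟩⟩
          · rw [hres]
            have h1 : pvSp (([] : List Int) ++ [x]) x = 0 := by
              unfold pvSp
              rw [hLx, hFx]
              simp
            have h2 : pvF (([] : List Int) ++ [x]) x = 0 := by rw [hFx]; rfl
            have h3 : pvL (([] : List Int) ++ [x]) x = 0 := by rw [hLx]; rfl
            rw [h1, h2, h3]
          · intro v hv
            simp only [List.nil_append, List.mem_singleton] at hv
            subst hv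
            exact le_refl _
          · intro v hv _
            simp only [List.nil_append, List.mem_singleton] at hv
            subst hv
            exact le_refl _
        · have hst : pvStA l = (pvFD l, pvSp l w, pvF l w, some (w, pvL l w)) := by
            rw [← hA1, ← hst2]
          have hwb := hbnd w hwl
          have hwx : w ≠ x := fun e => hx (e ▸ hwl)
          have hspw : pvSp (l ++ [x]) w = pvSp l w := by
            unfold pvSp; rw [hLne w hwx, hFne w hwx]
          have hsp0 : pvSp (l ++ [x]) x = 0 := by
            unfold pvSp; rw [hLx, hFx]; omega
          have hspwnn : 0 ≤ pvSp l w := by unfold pvSp; omega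
          have hres : pvStA (l ++ [x]) =
              ((pvFD l).insert x (l.length : Int), pvSp l w, pvF l w, some (w, pvL l w)) := by
            rw [hsn, hst]
            have hb2 : ¬ ((l.length : Int) < pvF l w) := by omega
            simp [pvAStep, hc, PySem.Dict.getD_insert_self, hb2]
            intro h
            omega
          refine ⟨by rw [hres, hFD],
            Or.inr ⟨w, List.mem_append_left _ hwl, ?_, ?_, ?_⟩⟩
          · rw [hres, hspw, hFne w hwx, hLne w hwx]
          · intro v hv
            rw [hspw]
            by_cases hvx : v = x
            · subst hvx
              rw [hsp0]
              exact hspwnn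
            · have hvl : v ∈ l := by
                rcases List.mem_append.mp hv with h | h
                · exact h
                · simp only [List.mem_singleton] at h; exact absurd h hvx
              have h1 : pvSp (l ++ [x]) v = pvSp l v := by
                unfold pvSp; rw [hLne v hvx, hFne v hvx]
              have := hmax v hvl
              omega
          · intro v hv hsp
            rw [hspw] at hsp
            rw [hFne w hwx]
            by_cases hvx : v = x
            · subst hvx
              rw [hFx]
              omega
            · have hvl : v ∈ l := by
                rcases List.mem_append.mp hv with h | h
                · exact h
                · simp only [List.mem_singleton] at h; exact absurd h hvx
              have h1 : pvSp (l ++ [x]) v = pvSp l v := by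
                unfold pvSp; rw [hLne v hvx, hFne v hvx]
              rw [h1] at hsp
              rw [hFne v hvx]
              exact htie v hvl hsp

-- B's reduction: characterisation of the strict-argmax fold
lemma pvBestFold (lastD : PySem.Dict Int Int) :
    ∀ (L : List (Int × Int)) (w fw : Int),
      (∀ q ∈ L, fw < q.2) → L.Pairwise (fun a b => a.2 < b.2) →
      ∃ w' fw',
        L.foldl (pvBBest lastD) (some (w, lastD.getD w 0 - fw)) =
          some (w', lastD.getD w' 0 - fw') ∧
        ((w' = w ∧ fw' = fw) ∨
          ((w', fw') ∈ L ∧ lastD.getD w 0 - fw < lastD.getD w' 0 - fw')) ∧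
        (∀ q ∈ L, lastD.getD q.1 0 - q.2 ≤ lastD.getD w' 0 - fw') ∧
        (∀ q ∈ L, lastD.getD q.1 0 - q.2 = lastD.getD w' 0 - fw' → fw' ≤ q.2) := by
  intro L
  induction L with
  | nil =>
      intro w fw _ _
      exact ⟨w, fw, rfl, Or.inl ⟨rfl, rfl⟩, by simp, by simp⟩
  | cons q L ih =>
      intro w fw hfw hpw
      obtain ⟨hq, hpwL⟩ := List.pairwise_cons.mp hpw
      by_cases hgt : lastD.getD q.1 0 - q.2 > lastD.getD w 0 - fw
      · have hstep : (q :: L).foldl (pvBBest lastD) (some (w, lastD.getD w 0 - fw)) =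
            L.foldl (pvBBest lastD) (some (q.1, lastD.getD q.1 0 - q.2)) := by
          simp [pvBBest, hgt]
        obtain ⟨w', fw', he, hd, hmax, htie⟩ := ih q.1 q.2 hq hpwL
        refine ⟨w', fw', by rw [hstep, he], ?_, ?_, ?_⟩
        · rcases hd with ⟨rfl, rfl⟩ | ⟨hm, hlt⟩
          · exact Or.inr ⟨by simp, hgt⟩
          · exact Or.inr ⟨List.mem_cons_of_mem _ hm, by omega⟩
        · intro r hr
          rcases List.mem_cons.mp hr with rfl | hr
          · rcases hd with ⟨rfl, rfl⟩ | ⟨hm, hlt⟩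
            · exact le_refl _
            · omega
          · exact hmax r hr
        · intro r hr hr2
          rcases List.mem_cons.mp hr with rfl | hr
          · rcases hd with ⟨rfl, rfl⟩ | ⟨hm, hlt⟩
            · exact le_refl _
            · omega
          · exact htie r hr hr2
      · have hstep : (q :: L).foldl (pvBBest lastD) (some (w, lastD.getD w 0 - fw)) =
            L.foldl (pvBBest lastD) (some (w, lastD.getD w 0 - fw)) := by
          simp [pvBBest, hgt]
        obtain ⟨w', fw', he, hd, hmax, htie⟩ :=
          ih w fw (fun r hr => hfw r (List.mem_cons_of_mem _ hr)) hpwL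
        refine ⟨w', fw', by rw [hstep, he], ?_, ?_, ?_⟩
        · rcases hd with ⟨rfl, rfl⟩ | ⟨hm, hlt⟩
          · exact Or.inl ⟨rfl, rfl⟩
          · exact Or.inr ⟨List.mem_cons_of_mem _ hm, hlt⟩
        · intro r hr
          rcases List.mem_cons.mp hr with rfl | hr
          · rcases hd with ⟨rfl, rfl⟩ | ⟨hm, hlt⟩
            · omega
            · omega
          · exact hmax r hr
        · intro r hr hr2
          rcases List.mem_cons.mp hr with rfl | hr
          · rcases hd with ⟨rfl, rfl⟩ | ⟨hm, hlt⟩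
            · exact (hfw r (List.mem_cons_self ..)).le
            · omega
          · exact htie r hr hr2

lemma pvPairwiseInj (L : List (Int × Int)) (h : L.Pairwise (fun a b => a.2 < b.2)) :
    ∀ a ∈ L, ∀ b ∈ L, a.2 = b.2 → a = b := by
  induction L with
  | nil =>
      intro a ha
      simp at ha
  | cons q L ih =>
      obtain ⟨hq, hL⟩ := List.pairwise_cons.mp h
      intro a ha b hb hab
      rcases List.mem_cons.mp ha with h1 | h1 <;> rcases List.mem_cons.mp hb with h2 | h2
      · rw [h1, h2]
      · exfalso
        rw [h1] at hab
        exact (ne_of_lt (hq b h2)) hab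
      · exfalso
        rw [h2] at hab
        exact (ne_of_lt (hq a h1)) hab.symm
      · exact ih hL a h1 b h2 hab

lemma pvMain (l : List Int) : farthest_first_last l = farthest_first_last_alt l := by
  obtain ⟨g1, g2, g3, g4, g5⟩ := pvGood l
  obtain ⟨hA1, hA2⟩ := pvAInv l
  rcases hA2 with ⟨hnil, hst2⟩ | ⟨w, hwl, hst2, hmax, htie⟩
  · subst hnil
    rfl
  · have hAval : farthest_first_last l = some (w, pvL l w) := by
      show (pvStA l).2.2.2 = _
      rw [hst2]
    have hwitem := g5 w hwl
    obtain ⟨q0, R, hitems⟩ : ∃ q0 R, (pvFD l).items = q0 :: R := by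
      cases h : (pvFD l).items with
      | nil => rw [h] at hwitem; simp at hwitem
      | cons a b => exact ⟨a, b, rfl⟩
    have hpw : (q0 :: R).Pairwise (fun a b => a.2 < b.2) := hitems ▸ g3
    obtain ⟨hq0, hpwR⟩ := List.pairwise_cons.mp hpw
    obtain ⟨w', fw', he, hd, hmax', htie'⟩ := pvBestFold (pvLD l) R q0.1 q0.2 hq0 hpwR
    have hBval : farthest_first_last_alt l = some (w', (pvLD l).getD w' 0) := by
      have hB0 : farthest_first_last_alt l =
          (match (pvFD l).items.foldl (pvBBest (pvLD l)) none with
           | none => none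
           | some bb => some (bb.1, (pvLD l).getD bb.1 0)) := rfl
      rw [hB0, hitems, List.foldl_cons]
      have h1 : pvBBest (pvLD l) none q0 = some (q0.1, (pvLD l).getD q0.1 0 - q0.2) := rfl
      rw [h1, he]
    -- every pair of the first table is dominated by (w', fw')
    have hall : ∀ p ∈ (pvFD l).items,
        (pvLD l).getD p.1 0 - p.2 ≤ (pvLD l).getD w' 0 - fw' ∧
        ((pvLD l).getD p.1 0 - p.2 = (pvLD l).getD w' 0 - fw' → fw' ≤ p.2) := by
      intro p hp
      rw [hitems] at hp
      rcases List.mem_cons.mp hp with rfl | hp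
      · rcases hd with ⟨rfl, rfl⟩ | ⟨hm, hlt⟩
        · exact ⟨le_refl _, fun _ => le_refl _⟩
        · exact ⟨by omega, by omega⟩
      · exact ⟨hmax' p hp, htie' p hp⟩
    have hpair : (w', fw') ∈ (pvFD l).items := by
      rw [hitems]
      rcases hd with ⟨rfl, rfl⟩ | ⟨hm, _⟩
      · simp
      · exact List.mem_cons_of_mem _ hm
    have hfw' : pvF l w' = fw' :=
      PySem.Dict.getD_of_mem_items _ hpair g2 0
    have hw'l : w' ∈ l :=
      (g1 w').mp ((PySem.Dict.contains_iff_mem_keys _ _).mpr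
        (PySem.Dict.mem_keys_of_mem_items _ hpair))
    have hsp' : pvSp l w' = (pvLD l).getD w' 0 - fw' := by
      unfold pvSp pvL
      rw [hfw']
    have hwdom := hall (w, pvF l w) hwitem
    have hle1 : pvSp l w ≤ pvSp l w' := by
      have : pvSp l w = (pvLD l).getD w 0 - pvF l w := rfl
      rw [this, hsp']
      exact hwdom.1
    have hle2 : pvSp l w' ≤ pvSp l w := hmax w' hw'l
    have hspeq : pvSp l w' = pvSp l w := le_antisymm hle2 hle1
    have hf1 : pvF l w ≤ pvF l w' := htie w' hw'l hspeq
    have hf2 : pvF l w' ≤ pvF l w := by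
      rw [hfw']
      exact hwdom.2 (by rw [← hsp', hspeq]; rfl)
    have hpair' : (w', pvF l w') ∈ (pvFD l).items := by
      rw [hfw']
      exact hpair
    have heqpair : (w, pvF l w) = (w', pvF l w') :=
      pvPairwiseInj _ g3 _ hwitem _ hpair' (by simpa using le_antisymm hf1 hf2)
    have hww' : w = w' := congrArg Prod.fst heqpair
    rw [hAval, hBval, hww']
    rfl

-- ===== VERDICT (by name: the statement is the Claim_ definition above) =====
theorem farthest_first_last_spec : Claim_equal_farthest_first_last := by
  intro lst _
  unfold Spec_farthest_first_last
  exact pvMain lst
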